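-- pv_equiv track=rewrite | github.com/stanfordnlp/stanza | stanza/models/langid/create_ud_data.py | sentence_to_windows
-- ===== SOURCE A (Python) =====
-- from string import digits
--
-- def sentence_to_windows(sentence, min_window, max_window):
--     """
--     Create window size chunks from a sentence, always starting with a word
--     """
--     windows = []
--     words = sentence.split(" ")
--     curr_window = ""
--     for idx, word in enumerate(words):
--         curr_window += (" " + word)
--         curr_window = curr_window.lstrip()
--         next_word_len = len(words[idx+1]) + 1 if idx+1 < len(words) else 0
--         if len(curr_window) + next_word_len > max_window:
--             curr_window = clean_sentence(curr_window)
--             if validate_sentence(curr_window, min_window):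
--                 windows.append(curr_window.strip())
--             curr_window = ""
--     if len(curr_window) >= min_window:
--         windows.append(curr_window)
--     return windows
--
-- def validate_sentence(current_window, min_window):
--     """
--     Sentence validation from: LSTM-LID
--     GitHub: https://github.com/AU-DIS/LSTM_langid/blob/main/src/dataset_creator.py
--     """
--     if len(current_window) < min_window:
--         return False
--     return True
--
-- def find(s, ch):
--     """
--     Helper for clean_sentence from LSTM-LID
--     GitHub: https://github.com/AU-DIS/LSTM_langid/blob/main/src/dataset_creator.py
--     """
--     return [i for i, ltr in enumerate(s) if ltr == ch]
--
-- def clean_sentence(line):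
--     """
--     Sentence cleaning from LSTM-LID
--     GitHub: https://github.com/AU-DIS/LSTM_langid/blob/main/src/dataset_creator.py
--     """
--     # We remove some special characters and fix small errors in the data, to improve the quality of the data
--     line = line.replace("\n", '') #{"text": "- Mor.\n", "label": "da"}
--     line = line.replace("- ", '') #{"text": "- Mor.", "label": "da"}
--     line = line.replace("_", '') #{"text": "- Mor.", "label": "da"}
--     line = line.replace("\\", '')
--     line = line.replace("\"", '')
--     line = line.replace("  ", " ")
--     remove_digits = str.maketrans('', '', digits)
--     line = line.translate(remove_digits)
--     words = line.split()
--     new_words = []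
--     # Below fixes large I instead of l. Does not catch everything, but should also not really make any mistakes either
--     for word in words:
--         clean_word = word
--         s = clean_word
--         if clean_word[1:].__contains__("I"):
--             indices = find(clean_word, "I")
--             for indx in indices:
--                 if clean_word[indx-1].islower():
--                     if len(clean_word) > indx + 1:
--                         if clean_word[indx+1].islower():
--                             s = s[:indx] + "l" + s[indx + 1:]
--                     else:
--                         s = s[:indx] + "l" + s[indx + 1:]
--         new_words.append(s)
--     new_line = " ".join(new_words)
--     return new_line
-- ===== SOURCE B (Python) =====
-- from string import digits
--
--
-- def sentence_to_windows(sentence, min_window, max_window):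
--     """
--     Two-pass rewrite: pass 1 chunks the words into groups (tracking the
--     length of the left-stripped window), pass 2 cleans/validates each
--     completed group; the trailing group is appended raw.
--     """
--     words = sentence.split(" ")
--     # pass 1: group words
--     groups = []
--     cur, cur_len = [], 0
--     for idx, w in enumerate(words):
--         # running length of the left-stripped window after adding w
--         cur_len = len(w.lstrip()) if cur_len == 0 else cur_len + 1 + len(w)
--         nxt = len(words[idx + 1]) + 1 if idx + 1 < len(words) else 0
--         if cur_len + nxt > max_window:
--             groups.append(cur + [w])
--             cur, cur_len = [], 0
--         else:
--             cur.append(w)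
--     # pass 2: clean and validate the completed groups
--     windows = []
--     for g in groups:
--         cleaned = clean_sentence(" ".join(g).lstrip())
--         if validate_sentence(cleaned, min_window):
--             windows.append(cleaned.strip())
--     # the trailing group is kept raw (uncleaned, only left-stripped)
--     tail = " ".join(cur).lstrip()
--     if len(tail) >= min_window:
--         windows.append(tail)
--     return windows
--
--
-- def validate_sentence(current_window, min_window):
--     if len(current_window) < min_window:
--         return False
--     return True
--
--
-- def find(s, ch):
--     return [i for i, ltr in enumerate(s) if ltr == ch]
--
--
-- def clean_sentence(line):
--     line = line.replace("\n", '')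
--     line = line.replace("- ", '')
--     line = line.replace("_", '')
--     line = line.replace("\\", '')
--     line = line.replace("\"", '')
--     line = line.replace("  ", " ")
--     remove_digits = str.maketrans('', '', digits)
--     line = line.translate(remove_digits)
--     words = line.split()
--     new_words = []
--     for word in words:
--         clean_word = word
--         s = clean_word
--         if clean_word[1:].__contains__("I"):
--             indices = find(clean_word, "I")
--             for indx in indices:
--                 if clean_word[indx-1].islower():
--                     if len(clean_word) > indx + 1:
--                         if clean_word[indx+1].islower():
--                             s = s[:indx] + "l" + s[indx + 1:]
--                     else:
--                         s = s[:indx] + "l" + s[indx + 1:]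
--         new_words.append(s)
--     new_line = " ".join(new_words)
--     return new_line
-- ===== Notes on version B (the rewrite author's own statement) =====
-- stated objective: alternative
-- what changed: A's single greedy loop that mutates a string window (append word, lstrip, clean+validate inline) is re-decomposed into two passes: pass 1 chunks the word list into completed groups plus a trailing group while tracking the lstripped window length as an integer, pass 2 joins, cleans and validates each completed group; the trailing group is appended raw.
import Mathlib
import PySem

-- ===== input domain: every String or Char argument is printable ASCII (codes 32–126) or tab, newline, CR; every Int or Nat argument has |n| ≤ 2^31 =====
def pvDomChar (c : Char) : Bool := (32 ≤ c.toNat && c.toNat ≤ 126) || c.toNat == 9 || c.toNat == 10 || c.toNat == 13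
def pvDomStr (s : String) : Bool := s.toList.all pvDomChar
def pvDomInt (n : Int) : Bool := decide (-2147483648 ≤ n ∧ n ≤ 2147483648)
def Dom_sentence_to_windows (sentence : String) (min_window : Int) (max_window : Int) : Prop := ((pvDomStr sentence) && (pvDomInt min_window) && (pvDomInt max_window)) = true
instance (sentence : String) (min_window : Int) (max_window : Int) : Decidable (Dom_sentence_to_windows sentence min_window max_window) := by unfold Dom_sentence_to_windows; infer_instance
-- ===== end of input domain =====

-- B re-decomposes A's single greedy loop into two passes (chunk words into groups, then clean/validate each
-- group); same return value, similar cost (objective: alternative).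

-- ===== PORT A =====
-- shared helpers (the same helper functions appear verbatim in both Pythons)

-- find(s, ch) = [i for i, ltr in enumerate(s) if ltr == ch]
def pvFind (s : List Char) (ch : Char) : List Int :=
  (PySem.List.enumerate s).foldl (fun acc p => if p.2 == ch then acc ++ [p.1] else acc) []

-- the per-word I→l fix inside clean_sentence's loop; the default of pyGetD is never used:
-- indx-1 ≥ -1 and indx+1 < len are in Python range (indx = 0 reads clean_word[-1], kept exact by pyGetD)
def pvFixWord (w : List Char) : List Char :=
  if PySem.Chars.isIn ['I'] (PySem.List.slice w (some 1) none) then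
    (pvFind w 'I').foldl (fun s indx =>
      if PySem.Chars.islower (PySem.List.pyGetD w (indx - 1) 'A') then
        if (w.length : Int) > indx + 1 then
          if PySem.Chars.islower (PySem.List.pyGetD w (indx + 1) 'A') then
            PySem.List.slice s none (some indx) ++ 'l' :: PySem.List.slice s (some (indx + 1)) none
          else s
        else
          PySem.List.slice s none (some indx) ++ 'l' :: PySem.List.slice s (some (indx + 1)) none
      else s) w
  else w

-- clean_sentence; str.maketrans('', '', digits)/translate deletes exactly the ASCII digits (exact: filter)
def pvClean (line : List Char) : List Char :=
  let l1 := PySem.Chars.replace line ['\n'] []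
  let l2 := PySem.Chars.replace l1 ['-', ' '] []
  let l3 := PySem.Chars.replace l2 ['_'] []
  let l4 := PySem.Chars.replace l3 ['\\'] []
  let l5 := PySem.Chars.replace l4 ['\"'] []
  let l6 := PySem.Chars.replace l5 [' ', ' '] [' ']
  let l7 := l6.filter (fun c => !(PySem.Chars.isdigit c))
  let words := PySem.Chars.split₀ l7
  let newWords := words.foldl (fun acc w => acc ++ [pvFixWord w]) []
  PySem.Chars.join [' '] newWords

-- validate_sentence
def pvValidate (cw : List Char) (minw : Int) : Bool :=
  if (cw.length : Int) < minw then false else true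

-- A's loop over the words; the one-word lookahead words[idx+1] is the head of the remaining list
def pvLoopA (minw maxw : Int) : List (List Char) → List (List Char) × List Char → List (List Char) × List Char
  | [], st => st
  | w :: rest, (wins, curr) =>
    let curr' := PySem.Chars.lstrip (curr ++ ' ' :: w)
    let nxt : Int := match rest with
      | [] => 0
      | nw :: _ => (nw.length : Int) + 1
    if (curr'.length : Int) + nxt > maxw then
      let cleaned := pvClean curr'
      pvLoopA minw maxw rest
        ((if pvValidate cleaned minw then wins ++ [PySem.Chars.strip cleaned] else wins), [])
    else
      pvLoopA minw maxw rest (wins, curr')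

def sentence_to_windows (sentence : String) (min_window : Int) (max_window : Int) : List String :=
  let words := PySem.Chars.splitOn sentence.toList [' ']
  let P := pvLoopA min_window max_window words ([], [])
  let wins := if (P.2.length : Int) ≥ min_window then P.1 ++ [P.2] else P.1
  wins.map String.ofList

-- ===== PORT B =====
-- pass 1: chunk the words into completed groups plus the trailing group,
-- tracking the length of the left-stripped window as an integer
def pvChunkB (maxw : Int) : List (List Char) → List (List (List Char)) → List (List Char) → Int →
    List (List (List Char)) × List (List Char)
  | [], groups, cur, _ => (groups, cur)
  | w :: rest, groups, cur, curLen =>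
    let curLen' : Int := if curLen = 0 then ((PySem.Chars.lstrip w).length : Int)
                         else curLen + 1 + (w.length : Int)
    let nxt : Int := match rest with
      | [] => 0
      | nw :: _ => (nw.length : Int) + 1
    if curLen' + nxt > maxw then pvChunkB maxw rest (groups ++ [cur ++ [w]]) [] 0
    else pvChunkB maxw rest groups (cur ++ [w]) curLen'

-- pass 2 body: clean and validate one completed group
def pvEmit (minw : Int) (wins : List (List Char)) (g : List (List Char)) : List (List Char) :=
  let cleaned := pvClean (PySem.Chars.lstrip (PySem.Chars.join [' '] g))
  if pvValidate cleaned minw then wins ++ [PySem.Chars.strip cleaned] else wins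

def sentence_to_windows_alt (sentence : String) (min_window : Int) (max_window : Int) : List String :=
  let words := PySem.Chars.splitOn sentence.toList [' ']
  let P := pvChunkB max_window words [] [] 0
  let wins := P.1.foldl (pvEmit min_window) []
  let tail := PySem.Chars.lstrip (PySem.Chars.join [' '] P.2)
  let wins' := if (tail.length : Int) ≥ min_window then wins ++ [tail] else wins
  wins'.map String.ofList

-- ===== PRECONDITION & SPEC =====
def Spec_sentence_to_windows (sentence : String) (min_window : Int) (max_window : Int) (out : List String) : Prop := out = sentence_to_windows_alt sentence min_window max_window
instance (sentence : String) (min_window : Int) (max_window : Int) (out : List String) : Decidable (Spec_sentence_to_windows sentence min_window max_window out) := by unfold Spec_sentence_to_windows; infer_instance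

-- ===== CLAIM (what is proved, stated in full; the proofs are below) =====
def Claim_equal_sentence_to_windows : Prop := ∀ (sentence : String) (min_window : Int) (max_window : Int), Dom_sentence_to_windows sentence min_window max_window → Spec_sentence_to_windows sentence min_window max_window (sentence_to_windows sentence min_window max_window)

-- ===== LEMMAS AND PROOFS =====

-- the left-stripped window represented by a group of words
def pvL (g : List (List Char)) : List Char :=
  PySem.Chars.lstrip (PySem.Chars.join [' '] g)

lemma pvL_nil : pvL [] = [] := rfl

lemma pv_lstrip_cons_space (w : List Char) :
    PySem.Chars.lstrip (' ' :: w) = PySem.Chars.lstrip w := by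
  simp [PySem.Chars.lstrip, List.dropWhile]
  rfl

lemma pv_join_snoc (c w : List Char) (cs : List (List Char)) :
    PySem.Chars.join [' '] ((c :: cs) ++ [w]) = PySem.Chars.join [' '] (c :: cs) ++ ' ' :: w := by
  induction cs generalizing c with
  | nil => simp [PySem.Chars.join, List.intercalate, List.intersperse]
  | cons d ds ih =>
      have h2 : ∀ (x y : List Char) (l : List (List Char)),
          PySem.Chars.join [' '] (x :: y :: l) = x ++ ' ' :: PySem.Chars.join [' '] (y :: l) := by
        intro x y l
        simp [PySem.Chars.join, List.intercalate, List.intersperse]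
      simp only [List.cons_append] at ih ⊢
      rw [h2, h2, ih d]
      simp

lemma pv_lstrip_lstrip_append (x y : List Char) :
    PySem.Chars.lstrip (PySem.Chars.lstrip x ++ y) = PySem.Chars.lstrip (x ++ y) := by
  induction x with
  | nil => rfl
  | cons a x ih =>
      by_cases h : PySem.Chars.isspace a
      · simpa [PySem.Chars.lstrip, List.dropWhile, h] using ih
      · simp [PySem.Chars.lstrip, List.dropWhile, h]

-- A's update of the window is B's group extension
lemma pvL_snoc (cur : List (List Char)) (w : List Char) :
    PySem.Chars.lstrip (pvL cur ++ ' ' :: w) = pvL (cur ++ [w]) := by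
  cases cur with
  | nil =>
      have : pvL [w] = PySem.Chars.lstrip w := by
        simp [pvL, PySem.Chars.join, List.intercalate, List.intersperse]
      rw [List.nil_append, this, pvL_nil, List.nil_append, pv_lstrip_cons_space]
  | cons c cs =>
      rw [pvL, pv_lstrip_lstrip_append, pvL, pv_join_snoc]

lemma pvL_snoc_of_nil (cur : List (List Char)) (w : List Char) (h : pvL cur = []) :
    pvL (cur ++ [w]) = PySem.Chars.lstrip w := by
  rw [← pvL_snoc, h]
  simpa using pv_lstrip_cons_space w

lemma pvL_snoc_of_ne_nil (cur : List (List Char)) (w : List Char) (h : pvL cur ≠ []) :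
    pvL (cur ++ [w]) = pvL cur ++ ' ' :: w := by
  rw [← pvL_snoc]
  have h2 : PySem.Chars.lstrip (pvL cur) = pvL cur := by
    simp [pvL, PySem.Chars.lstrip, List.dropWhile_idempotent]
  rcases hc : pvL cur with _ | ⟨a, t⟩
  · exact absurd hc h
  · have ha : PySem.Chars.isspace a = false := by
      have := h2
      rw [hc] at this
      by_contra hb
      simp only [Bool.not_eq_false] at hb
      simp [PySem.Chars.lstrip, hb] at this
      have := congrArg List.length this
      simp at this
      have hle := List.length_dropWhile_le (p := PySem.Chars.isspace) t
      omega
    simp [PySem.Chars.lstrip, ha]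

-- B's integer length tracking is the length of A's window
lemma pv_len_snoc (cur : List (List Char)) (w : List Char) :
    ((pvL (cur ++ [w])).length : Int) =
      if ((pvL cur).length : Int) = 0 then ((PySem.Chars.lstrip w).length : Int)
      else ((pvL cur).length : Int) + 1 + (w.length : Int) := by
  by_cases h : pvL cur = []
  · simp [pvL_snoc_of_nil cur w h, h]
  · rw [if_neg (by simpa using h), pvL_snoc_of_ne_nil cur w h]
    push_cast [List.length_append, List.length_cons]
    ring

-- the group accumulator of pvChunkB appends
lemma pvChunkB_acc (maxw : Int) (rest : List (List Char)) :
    ∀ (g0 : List (List (List Char))) (cur : List (List Char)) (l : Int),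
      pvChunkB maxw rest g0 cur l =
        (g0 ++ (pvChunkB maxw rest [] cur l).1, (pvChunkB maxw rest [] cur l).2) := by
  induction rest with
  | nil => intro g0 cur l; simp [pvChunkB]
  | cons w rest ih =>
      intro g0 cur l
      simp only [pvChunkB]
      generalize (if l = 0 then ((PySem.Chars.lstrip w).length : Int)
                  else l + 1 + (w.length : Int)) = L
      generalize (match rest with
                  | [] => (0 : Int)
                  | nw :: _ => (nw.length : Int) + 1) = nxt
      split
      · simp only [List.nil_append]
        rw [ih (g0 ++ [cur ++ [w]]) [] 0, ih [cur ++ [w]] [] 0]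
        simp
      · exact ih g0 (cur ++ [w]) L

-- main invariant: A's loop = chunking then emitting
lemma pv_main (minw maxw : Int) (rest : List (List Char)) :
    ∀ (cur : List (List Char)) (wins : List (List Char)),
      pvLoopA minw maxw rest (wins, pvL cur) =
        ((pvChunkB maxw rest [] cur ((pvL cur).length : Int)).1.foldl (pvEmit minw) wins,
         pvL (pvChunkB maxw rest [] cur ((pvL cur).length : Int)).2) := by
  induction rest with
  | nil => intro cur wins; simp [pvLoopA, pvChunkB]
  | cons w rest ih =>
      intro cur wins
      simp only [pvLoopA, pvChunkB]
      rw [pvL_snoc, ← pv_len_snoc]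
      generalize (match rest with
                  | [] => (0 : Int)
                  | nw :: _ => (nw.length : Int) + 1) = nxt
      split
      · have h0 := ih []
          (if pvValidate (pvClean (pvL (cur ++ [w]))) minw then
            wins ++ [PySem.Chars.strip (pvClean (pvL (cur ++ [w])))] else wins)
        simp only [pvL_nil, List.length_nil, Nat.cast_zero] at h0
        rw [h0, List.nil_append, pvChunkB_acc maxw rest [cur ++ [w]] [] 0]
        simp [pvEmit, pvL]
      · exact ih (cur ++ [w]) wins

-- ===== VERDICT (by name: the statement is the Claim_ definition above) =====
theorem sentence_to_windows_spec : Claim_equal_sentence_to_windows := by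
  intro sentence minw maxw _
  unfold Spec_sentence_to_windows sentence_to_windows sentence_to_windows_alt
  have h := pv_main minw maxw (PySem.Chars.splitOn sentence.toList [' ']) [] []
  simp only [pvL_nil, List.length_nil, Nat.cast_zero] at h
  simp only [h, pvL]
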